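-- pv_equiv track=rewrite | github.com/Serge45/Tensile | Scripts/Structs.py | getMinNaming
-- ===== SOURCE A (Python) =====
-- def getMinNaming(kernels):
--   requiredParameters = {}
--   for key in kernels[0]:
--     required = False
--     for i in range(1, len(kernels)):
--       if kernels[0][key] != kernels[i][key]:
--         required = True
--         break
--     if required:
--       requiredParameters[key] = True
--   return requiredParameters
-- ===== SOURCE B (Python) =====
-- def getMinNaming(kernels):
--   first = kernels[0]
--   flags = {key: False for key in first}
--   for kern in kernels[1:]:
--     flags = {key: flags[key] or kern[key] != first[key] for key in flags}
--   return {key: flag for key, flag in flags.items() if flag}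
-- ===== Notes on version B (the rewrite author's own statement) =====
-- stated objective: alternative
-- what changed: Transposes the traversal: instead of A's per-key scan over the later kernels with an early break, B makes one pass per kernel over a per-key boolean flags dict (flag := flag or this kernel differs from the first), then keeps the keys whose flag is set.
import Mathlib
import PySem

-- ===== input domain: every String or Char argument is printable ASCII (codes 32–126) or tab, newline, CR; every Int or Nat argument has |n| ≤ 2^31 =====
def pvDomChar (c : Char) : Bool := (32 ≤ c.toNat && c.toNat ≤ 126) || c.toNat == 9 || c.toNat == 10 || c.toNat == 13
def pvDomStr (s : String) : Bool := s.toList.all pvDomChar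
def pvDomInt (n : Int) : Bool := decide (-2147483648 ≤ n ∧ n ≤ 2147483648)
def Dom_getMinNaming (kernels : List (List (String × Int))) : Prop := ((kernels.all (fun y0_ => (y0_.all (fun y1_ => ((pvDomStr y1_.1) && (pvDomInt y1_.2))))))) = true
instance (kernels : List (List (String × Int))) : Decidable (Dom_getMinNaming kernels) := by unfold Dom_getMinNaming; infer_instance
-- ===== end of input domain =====

-- B: a transposed pass — iterate over the kernels, maintaining a per-key boolean 'flags' dict
-- rebuilt each pass (flag := flag or this kernel differs from the first), then keep the set flags.


-- ===== PORT A =====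
def getMinNaming (kernels : List (List (String × Int))) : List (String × Bool) :=
  match kernels with
  | [] => []  -- kernels[0] raises IndexError here; excluded by Pre_
  | k0 :: rest =>
    ((PySem.Dict.mk k0).keys.foldl
      (fun (acc : PySem.Dict String Bool) key =>
        -- required = some later kernel disagrees with kernels[0] on key (break = any's short circuit)
        if rest.any (fun ki => (PySem.Dict.mk k0).get? key != (PySem.Dict.mk ki).get? key)
        then acc.insert key true else acc)
      PySem.Dict.empty).items

-- ===== PORT B =====
def getMinNaming_alt (kernels : List (List (String × Int))) : List (String × Bool) :=
  match kernels with
  | [] => []  -- kernels[0] raises IndexError here; excluded by Pre_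
  | k0 :: rest =>
    let first := PySem.Dict.mk k0
    -- flags = {key: False for key in first}
    let flags0 : PySem.Dict String Bool :=
      first.keys.foldl (fun acc key => acc.insert key false) PySem.Dict.empty
    -- for kern in kernels[1:]: flags = {key: flags[key] or kern[key] != first[key] for key in flags}
    let flags := rest.foldl
      (fun (flags : PySem.Dict String Bool) kern =>
        flags.keys.foldl
          (fun acc key =>
            acc.insert key
              (flags.getD key false || ((PySem.Dict.mk kern).get? key != first.get? key)))
          PySem.Dict.empty)
      flags0
    -- return {key: flag for key, flag in flags.items() if flag}
    (flags.items.foldl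
      (fun (acc : PySem.Dict String Bool) kv => if kv.2 then acc.insert kv.1 kv.2 else acc)
      PySem.Dict.empty).items

-- ===== PRECONDITION & SPEC =====
-- Pre_ excludes exactly the inputs where A raises: the empty kernels list (IndexError) and a
-- kernel missing a key of kernels[0] with no earlier kernel differing on that key (KeyError;
-- B raises the same way — A's break and B's or-short-circuit stop probing at the first
-- difference); the Nodup clause only restates that Python dicts cannot hold duplicate keys.
def Pre_getMinNaming (kernels : List (List (String × Int))) : Prop :=
  kernels ≠ [] ∧
  (∀ k ∈ kernels, (k.map Prod.fst).Nodup) ∧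
  (∀ p ∈ kernels.headI, ∀ i ∈ List.range kernels.tail.length,
     p.1 ∈ (kernels.tail.getD i []).map Prod.fst ∨
     ∃ j ∈ List.range i, ∃ q ∈ kernels.tail.getD j [], q.1 = p.1 ∧ q.2 ≠ p.2)
instance (kernels : List (List (String × Int))) : Decidable (Pre_getMinNaming kernels) := by
  unfold Pre_getMinNaming; infer_instance
def pvWitness_getMinNaming : (List (List (String × Int))) :=
  [[("a", 1), ("b", 2)], [("a", 1), ("b", 3)]]
def Spec_getMinNaming (kernels : List (List (String × Int))) (out : List (String × Bool)) : Prop := out = getMinNaming_alt kernels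
instance (kernels : List (List (String × Int))) (out : List (String × Bool)) : Decidable (Spec_getMinNaming kernels out) := by unfold Spec_getMinNaming; infer_instance

-- ===== CLAIM (what is proved, stated in full; the proofs are below) =====
def Claim_equal_getMinNaming : Prop := ∀ (kernels : List (List (String × Int))), Dom_getMinNaming kernels → Pre_getMinNaming kernels → Spec_getMinNaming kernels (getMinNaming kernels)

-- ===== LEMMAS AND PROOFS =====

-- a != b is symmetric
theorem pv_bne_comm {α : Type} [BEq α] [LawfulBEq α] (a b : α) : (a != b) = (b != a) := by
  by_cases h : a = b
  · simp [h]
  · have h2 : (a == b) = false := beq_eq_false_iff_ne.mpr h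
    have h3 : (b == a) = false := beq_eq_false_iff_ne.mpr (Ne.symm h)
    simp [bne, h2, h3]

-- a conditional-insert fold over fresh distinct keys appends in order (A's comprehension shape)
theorem pv_foldl_insert_items (c : String → Bool) :
    ∀ (keys : List String) (acc : PySem.Dict String Bool),
      keys.Nodup → (∀ k ∈ keys, acc.contains k = false) →
      (keys.foldl (fun acc key => if c key then acc.insert key true else acc) acc).items
        = acc.items ++ (keys.filter c).map (fun k => (k, true)) := by
  intro keys
  induction keys with
  | nil => intro acc _ _; simp
  | cons k keys ih =>
    intro acc hnd hfresh
    have hndtail := (List.nodup_cons.mp hnd).2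
    have hknot := (List.nodup_cons.mp hnd).1
    by_cases hc : c k = true
    · have hk : acc.contains k = false := hfresh k (by simp)
      have hitems := PySem.Dict.items_insert_of_not_contains (d := acc) (k := k) (v := true) hk
      have hfresh' : ∀ k' ∈ keys, (acc.insert k true).contains k' = false := by
        intro k' hk'
        rw [PySem.Dict.contains_insert]
        have hne : k' ≠ k := fun h => hknot (h ▸ hk')
        simp [hne, hfresh k' (by simp [hk'])]
      rw [List.foldl_cons, if_pos hc, ih _ hndtail hfresh', hitems,
        List.filter_cons_of_pos hc]
      simp
    · have hfresh' : ∀ k' ∈ keys, acc.contains k' = false := fun k' hk' => hfresh k' (by simp [hk'])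
      rw [List.foldl_cons, if_neg (by simp [hc]), ih _ hndtail hfresh',
        List.filter_cons_of_neg hc]

-- building a dict by inserting each distinct key once yields the key-value map in order
theorem pv_build_items (keys : List String) (g : String → Bool) (hnd : keys.Nodup) :
    (keys.foldl (fun (acc : PySem.Dict String Bool) key => acc.insert key (g key))
        PySem.Dict.empty).items = keys.map (fun k => (k, g k)) := by
  have := PySem.Dict.items_foldl_insert_fresh (l := keys) (k := fun x => x) (v := g)
      (d := PySem.Dict.empty) (by intro a _; simp) (by simpa using hnd)
  simpa using this

-- one rebuild pass: if flags represents f on keys, the new dict represents f ∨ (this kernel differs)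
theorem pv_step_items (keys : List String) (hnd : keys.Nodup)
    (flags : PySem.Dict String Bool) (f : String → Bool)
    (hit : flags.items = keys.map (fun k => (k, f k))) (first : PySem.Dict String Int)
    (kern : List (String × Int)) :
    (flags.keys.foldl
        (fun (acc : PySem.Dict String Bool) key =>
          acc.insert key
            (flags.getD key false || ((PySem.Dict.mk kern).get? key != first.get? key)))
        PySem.Dict.empty).items
      = keys.map (fun k => (k, f k || ((PySem.Dict.mk kern).get? k != first.get? k))) := by
  have hkeys : flags.keys = keys := by
    simp [PySem.Dict.keys, hit, Function.comp_def]
  have hgetD : ∀ k ∈ keys, flags.getD k false = f k := by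
    intro k hk
    have hmem : (k, f k) ∈ flags.items := by
      rw [hit]; exact List.mem_map_of_mem hk
    have hknd : flags.keys.Nodup := by rw [hkeys]; exact hnd
    exact PySem.Dict.getD_of_mem_items flags hmem hknd false
  rw [hkeys, pv_build_items keys _ hnd]
  exact List.map_congr_left (fun k hk => by rw [hgetD k hk])

-- the whole loop over the remaining kernels: flags ends up representing 'some kernel differs'
theorem pv_loop_items (keys : List String) (hnd : keys.Nodup) (first : PySem.Dict String Int) :
    ∀ (rest : List (List (String × Int))) (flags : PySem.Dict String Bool) (f : String → Bool),
      flags.items = keys.map (fun k => (k, f k)) →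
      (rest.foldl
          (fun (flags : PySem.Dict String Bool) kern =>
            flags.keys.foldl
              (fun acc key =>
                acc.insert key
                  (flags.getD key false || ((PySem.Dict.mk kern).get? key != first.get? key)))
              PySem.Dict.empty)
          flags).items
        = keys.map (fun k => (k, f k || rest.any (fun ki => (PySem.Dict.mk ki).get? k != first.get? k))) := by
  intro rest
  induction rest with
  | nil => intro flags f hit; simpa using hit
  | cons kern rest ih =>
    intro flags f hit
    rw [List.foldl_cons,
      ih _ (fun k => f k || ((PySem.Dict.mk kern).get? k != first.get? k))
        (pv_step_items keys hnd flags f hit first kern)]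
    simp [Bool.or_assoc]

-- the filtering comprehension over pairs with distinct keys keeps exactly the flagged pairs
theorem pv_pairs_fold :
    ∀ (ps : List (String × Bool)) (acc : PySem.Dict String Bool),
      (ps.map Prod.fst).Nodup → (∀ p ∈ ps, acc.contains p.1 = false) →
      (ps.foldl (fun (acc : PySem.Dict String Bool) kv =>
          if kv.2 then acc.insert kv.1 kv.2 else acc) acc).items
        = acc.items ++ ps.filter (fun kv => kv.2) := by
  intro ps
  induction ps with
  | nil => intro acc _ _; simp
  | cons p ps ih =>
    intro acc hnd hfresh
    have hndtail : (ps.map Prod.fst).Nodup := (List.nodup_cons.mp (by simpa using hnd)).2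
    have hpnot : p.1 ∉ ps.map Prod.fst := (List.nodup_cons.mp (by simpa using hnd)).1
    by_cases hc : p.2 = true
    · have hk : acc.contains p.1 = false := hfresh p (by simp)
      have hitems := PySem.Dict.items_insert_of_not_contains (d := acc) (k := p.1) (v := p.2) hk
      have hfresh' : ∀ q ∈ ps, (acc.insert p.1 p.2).contains q.1 = false := by
        intro q hq
        rw [PySem.Dict.contains_insert]
        have hne : q.1 ≠ p.1 := fun h => hpnot (h ▸ List.mem_map_of_mem hq)
        simp [hne, hfresh q (by simp [hq])]
      rw [List.foldl_cons, if_pos hc, ih _ hndtail hfresh', hitems,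
        List.filter_cons_of_pos (by simpa using hc)]
      simp
    · have hfresh' : ∀ q ∈ ps, acc.contains q.1 = false := fun q hq => hfresh q (by simp [hq])
      rw [List.foldl_cons, if_neg (by simp [hc]), ih _ hndtail hfresh',
        List.filter_cons_of_neg (by simpa using hc)]

-- ===== VERDICT (by name: the statement is the Claim_ definition above) =====
theorem getMinNaming_spec : Claim_equal_getMinNaming := by
  intro kernels _ hpre
  unfold Spec_getMinNaming
  cases kernels with
  | nil => rfl
  | cons k0 rest =>
    obtain ⟨-, hnodup, -⟩ := hpre
    have hkeysnd : ((PySem.Dict.mk k0).keys).Nodup := by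
      have := hnodup k0 (by simp)
      simpa [PySem.Dict.keys] using this
    simp only [getMinNaming, getMinNaming_alt]
    -- A's side: the conditional-insert comprehension over the keys
    rw [pv_foldl_insert_items
          (fun key => rest.any (fun ki => (PySem.Dict.mk k0).get? key != (PySem.Dict.mk ki).get? key))
          _ PySem.Dict.empty hkeysnd (by intro k _; simp [PySem.Dict.contains_empty])]
    -- B's side: the flags loop, then the filtering comprehension over the resulting items
    have hinit : (((PySem.Dict.mk k0).keys).foldl
        (fun (acc : PySem.Dict String Bool) key => acc.insert key false)
        PySem.Dict.empty).items
        = ((PySem.Dict.mk k0).keys).map (fun k => (k, false)) :=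
      pv_build_items _ (fun _ => false) hkeysnd
    rw [pv_loop_items _ hkeysnd _ rest _ (fun _ => false) hinit]
    simp only [Bool.false_or]
    rw [pv_pairs_fold _ PySem.Dict.empty
          (by simpa [Function.comp_def] using hkeysnd)
          (by intro p _; simp [PySem.Dict.contains_empty])]
    rw [List.filter_map]
    simp only [PySem.Dict.empty, List.nil_append, Function.comp_def]
    -- both sides are filter-then-map over the same keys; align the two (symmetric) conditions
    have hcomm : (fun k => rest.any (fun ki => (PySem.Dict.mk ki).get? k != (PySem.Dict.mk k0).get? k))
        = (fun key => rest.any (fun ki => (PySem.Dict.mk k0).get? key != (PySem.Dict.mk ki).get? key)) := by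
      funext k; congr 1; funext ki; exact pv_bne_comm _ _
    rw [List.map_congr_left (l := ((PySem.Dict.mk k0).keys).filter
          (fun k => rest.any (fun ki => (PySem.Dict.mk ki).get? k != (PySem.Dict.mk k0).get? k)))
        (f := fun k => (k, rest.any (fun ki => (PySem.Dict.mk ki).get? k != (PySem.Dict.mk k0).get? k)))
        (g := fun k => (k, true))
        (fun k hk => by simp [(List.mem_filter.mp hk).2]),
      hcomm]
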